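-- pv_equiv track=rewrite | github.com/GarlicB/algostudy | kakao_2020_1st/q4_가사검색/2020_kakao_1st_q4_ndh.py | solution
-- ===== SOURCE A (Python) =====
-- def solution(w, q):
--     result = []
--
--     for i in range(len(q)):
--         count = 0
--         lenAll = len(q[i])
--
--         startQ = q[i].find("?")
--         endQ = startQ + q[i].count("?")-1
--
--         fStartQ = 0
--         fEndQ = 0
--
--         if startQ == 0:
--             fStartQ = endQ + 1
--             fEndQ = lenAll - 1
--         else:
--             fStartQ = 0
--             fEndQ = startQ - 1
--         for j in range(len(w)):
--             if len(w[j]) == len(q[i]):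
--
--                 final = w[j][fStartQ: fEndQ + 1]
--                 compare = q[i][fStartQ: fEndQ + 1]
--                 if(final == compare):
--                     count = count + 1
--
--         result.append(count)
--
--     return result
-- ===== SOURCE B (Python) =====
-- def solution(w, q):
--     # Group words by length once, and memoize answers for repeated queries,
--     # so each distinct query scans only words of its own length.
--     buckets = {}
--     for word in w:
--         buckets.setdefault(len(word), []).append(word)
--
--     cache = {}
--     result = []
--     for pat in q:
--         if pat not in cache:
--             s = pat.find("?")
--             e = s + pat.count("?") - 1
--             if s == 0:
--                 lo, hi = e + 1, len(pat)
--             else: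
--                 lo, hi = 0, s
--             key = pat[lo:hi]
--             cache[pat] = sum(1 for word in buckets.get(len(pat), [])
--                             if word[lo:hi] == key)
--         result.append(cache[pat])
--     return result
-- ===== Notes on version B (the rewrite author's own statement) =====
-- stated objective: faster
-- what changed: B builds a length-keyed dict of word buckets once and memoizes answers per distinct query, so each query scans only words of its own length instead of the whole word list per query.
import Mathlib
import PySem

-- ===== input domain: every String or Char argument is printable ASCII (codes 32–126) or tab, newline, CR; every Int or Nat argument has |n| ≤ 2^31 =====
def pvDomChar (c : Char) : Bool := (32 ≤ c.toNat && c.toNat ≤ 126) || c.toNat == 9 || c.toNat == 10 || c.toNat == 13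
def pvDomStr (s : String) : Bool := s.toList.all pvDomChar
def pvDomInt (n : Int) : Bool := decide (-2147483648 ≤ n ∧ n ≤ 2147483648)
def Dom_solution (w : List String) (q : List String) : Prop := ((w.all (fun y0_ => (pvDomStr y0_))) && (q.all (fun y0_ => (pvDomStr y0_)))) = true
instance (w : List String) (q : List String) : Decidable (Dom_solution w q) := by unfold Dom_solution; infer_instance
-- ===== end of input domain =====

-- B groups words by length into a dict once and memoizes repeated queries, so each query
-- scans only same-length words instead of the whole word list (objective: faster).


-- ===== PORT A =====
-- literal transliteration: for each query compute the fixed (non-'?') region, then scan ALL words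
def solution (w : List String) (q : List String) : List Int :=
  q.foldl (fun result qi =>
    let lenAll : Int := PySem.Str.len qi
    let startQ : Int := PySem.Str.find qi "?"
    let endQ : Int := startQ + (PySem.Str.count qi "?" : Int) - 1
    let fse : Int × Int := if startQ == 0 then (endQ + 1, lenAll - 1) else (0, startQ - 1)
    let count : Int := w.foldl (fun count wj =>
      if PySem.Str.len wj == PySem.Str.len qi then
        if PySem.Str.slice wj (some fse.1) (some (fse.2 + 1)) ==
           PySem.Str.slice qi (some fse.1) (some (fse.2 + 1)) then count + 1 else count
      else count) 0
    result ++ [count]) []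

-- ===== PORT B =====
-- buckets = {}; for word in w: buckets.setdefault(len(word), []).append(word)
def pvBuckets (w : List String) : PySem.Dict Int (List String) :=
  w.foldl (fun d s => d.modify (PySem.Str.len s) [] (fun l => l ++ [s])) PySem.Dict.empty

-- the count B computes for one pattern: scan only the bucket of words of the pattern's length
def pvCountFor (buckets : PySem.Dict Int (List String)) (pat : String) : Int :=
  let s : Int := PySem.Str.find pat "?"
  let e : Int := s + (PySem.Str.count pat "?" : Int) - 1
  let lohi : Int × Int := if s == 0 then (e + 1, PySem.Str.len pat) else (0, s)
  let key := PySem.Str.slice pat (some lohi.1) (some lohi.2)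
  (((buckets.getD (PySem.Str.len pat) []).filter
      (fun word => PySem.Str.slice word (some lohi.1) (some lohi.2) == key)).length : Int)

def solution_alt (w : List String) (q : List String) : List Int :=
  let buckets := pvBuckets w
  (q.foldl (fun st pat =>
      let cache' := if st.1.contains pat then st.1 else st.1.insert pat (pvCountFor buckets pat)
      (cache', st.2 ++ [cache'.getD pat 0]))
    ((PySem.Dict.empty : PySem.Dict String Int), ([] : List Int))).2

-- ===== PRECONDITION & SPEC =====
def Spec_solution (w : List String) (q : List String) (out : List Int) : Prop := out = solution_alt w q
instance (w : List String) (q : List String) (out : List Int) : Decidable (Spec_solution w q out) := by unfold Spec_solution; infer_instance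

-- ===== CLAIM (what is proved, stated in full; the proofs are below) =====
def Claim_equal_solution : Prop := ∀ (w : List String) (q : List String), Dom_solution w q → Spec_solution w q (solution w q)

-- ===== LEMMAS AND PROOFS =====

-- B's bucket for length L holds exactly the words of length L, in order
theorem pvBuckets_getD (w : List String) (L : Int) :
    (pvBuckets w).getD L [] = w.filter (fun s => PySem.Str.len s == L) := by
  have h : pvBuckets w =
      (w.map (fun s => (PySem.Str.len s, s))).foldl
        (fun d p => d.modify p.1 [] (fun l => l ++ [p.2])) PySem.Dict.empty := by
    simp [pvBuckets, List.foldl_map]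
  rw [h, PySem.Dict.getD_foldl_modify_append]
  simp [List.filter_map, Function.comp_def]

-- A's counting loop over all words is the double filter B counts, for any fixed slice bounds
theorem countAux (w : List String) (qi : String) (lo hi : Int) :
    (w.foldl (fun count wj =>
      if PySem.Str.len wj == PySem.Str.len qi then
        if PySem.Str.slice wj (some lo) (some hi) == PySem.Str.slice qi (some lo) (some hi)
        then count + 1 else count
      else count) 0)
    = (((w.filter (fun s => PySem.Str.len s == PySem.Str.len qi)).filter
        (fun word => PySem.Str.slice word (some lo) (some hi) ==
                     PySem.Str.slice qi (some lo) (some hi))).length : Int) := by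
  rw [List.filter_filter]
  have hfun : (fun (count : Int) (wj : String) =>
      if PySem.Str.len wj == PySem.Str.len qi then
        if PySem.Str.slice wj (some lo) (some hi) == PySem.Str.slice qi (some lo) (some hi)
        then count + 1 else count
      else count)
    = (fun (count : Int) (wj : String) =>
      if ((PySem.Str.slice wj (some lo) (some hi) == PySem.Str.slice qi (some lo) (some hi)) &&
          (PySem.Str.len wj == PySem.Str.len qi)) then count + 1 else count) := by
    funext count wj
    by_cases h1 : PySem.Str.len wj == PySem.Str.len qi <;>
      by_cases h2 : PySem.Str.slice wj (some lo) (some hi) == PySem.Str.slice qi (some lo) (some hi) <;>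
      simp_all
  rw [hfun]
  rw [PySem.List.foldl_if_add_one]
  simp [List.countP_eq_length_filter]

-- the count A computes for one pattern equals B's pvCountFor
theorem count_eq (w : List String) (qi : String) :
    (w.foldl (fun count wj =>
      if PySem.Str.len wj == PySem.Str.len qi then
        if PySem.Str.slice wj
             (some ((if (PySem.Str.find qi "?") == 0 then
                (PySem.Str.find qi "?" + (PySem.Str.count qi "?" : Int) - 1 + 1, PySem.Str.len qi - 1)
              else ((0 : Int), PySem.Str.find qi "?" - 1)) : Int × Int).1)
             (some (((if (PySem.Str.find qi "?") == 0 then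
                (PySem.Str.find qi "?" + (PySem.Str.count qi "?" : Int) - 1 + 1, PySem.Str.len qi - 1)
              else ((0 : Int), PySem.Str.find qi "?" - 1)) : Int × Int).2 + 1)) ==
           PySem.Str.slice qi
             (some ((if (PySem.Str.find qi "?") == 0 then
                (PySem.Str.find qi "?" + (PySem.Str.count qi "?" : Int) - 1 + 1, PySem.Str.len qi - 1)
              else ((0 : Int), PySem.Str.find qi "?" - 1)) : Int × Int).1)
             (some (((if (PySem.Str.find qi "?") == 0 then
                (PySem.Str.find qi "?" + (PySem.Str.count qi "?" : Int) - 1 + 1, PySem.Str.len qi - 1)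
              else ((0 : Int), PySem.Str.find qi "?" - 1)) : Int × Int).2 + 1))
        then count + 1 else count
      else count) 0) = pvCountFor (pvBuckets w) qi := by
  unfold pvCountFor
  rw [pvBuckets_getD, countAux]
  by_cases h0 : PySem.Str.find qi "?" = 0 <;>
    [skip; skip] <;> (simp at h0; simp [h0, sub_add_cancel])

-- the memoizing loop of B produces the map of pvCountFor
theorem cache_loop (bk : PySem.Dict Int (List String)) (q : List String) :
    ∀ (cache : PySem.Dict String Int) (acc : List Int),
      (∀ k v, cache.get? k = some v → v = pvCountFor bk k) →
      (q.foldl (fun st pat =>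
          let cache' := if st.1.contains pat then st.1 else st.1.insert pat (pvCountFor bk pat)
          (cache', st.2 ++ [cache'.getD pat 0])) (cache, acc)).2
        = acc ++ q.map (pvCountFor bk) := by
  induction q with
  | nil => intro cache acc _; simp
  | cons pat rest ih =>
    intro cache acc hinv
    simp only [List.foldl_cons, List.map_cons]
    by_cases hc : cache.contains pat
    · have hsome : (cache.get? pat).isSome := by
        rw [← PySem.Dict.contains_eq_isSome_get?]; exact hc
      obtain ⟨v, hv⟩ := Option.isSome_iff_exists.mp hsome
      have hval : cache.getD pat 0 = pvCountFor bk pat := by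
        rw [PySem.Dict.getD_eq_get?_getD, hv]; exact hinv pat v hv
      simp only [hc, if_true]
      rw [ih cache (acc ++ [cache.getD pat 0]) hinv, hval, List.append_assoc]
      rfl
    · have hinv' : ∀ k v, (cache.insert pat (pvCountFor bk pat)).get? k = some v →
          v = pvCountFor bk k := by
        intro k v hkv
        rw [PySem.Dict.get?_insert] at hkv
        by_cases hk : k = pat
        · simp [hk] at hkv; rw [← hkv, hk]
        · exact hinv k v (by simpa [hk] using hkv)
      rw [if_neg hc]
      rw [ih _ _ hinv', PySem.Dict.getD_insert_self, List.append_assoc]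
      rfl

-- ===== VERDICT (by name: the statement is the Claim_ definition above) =====
theorem solution_spec : Claim_equal_solution := by
  intro w q _
  unfold Spec_solution solution solution_alt
  rw [cache_loop (pvBuckets w) q PySem.Dict.empty []
    (by intro k v hkv; simp [PySem.Dict.get?_empty] at hkv)]
  rw [PySem.List.foldl_append_singleton_eq_map]
  simp only [List.nil_append]
  exact List.map_congr_left (fun qi _ => count_eq w qi)
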